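-- pv_equiv track=rewrite | github.com/qldrh112/qldrh112 | ssafy/algorithm/little_bit_harder/8797.py | get_carrots
-- ===== SOURCE A (Python) =====
-- def rotation_arr(n, arr):
--     """
--     n: arr 의 크기(n * n)
--     arr: 2차원 리스트
--     return: 오른쪽으로 90도 회전한 리스트
--     """
--     arr90 = [[0] * n for _ in range(n)]
--     for col in range(n):
--         for row in range(n):
--             arr90[row][n-col-1] = arr[col][row]
--
--     return arr90
--
-- def get_carrots(n, arr):
--     """
--     n: arr 의 크기(n * n)
--     arr: 2차원 리스트
--     return: 영역의 수확량 중 가장 큰 값 - 영역의 수확량 중 가장 작은 값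
--     """
--     carrots_yield = [0] * 4
--
--     for i in range(4):
--         if i:
--             # arr 를 돌린 arr90 으로 지정해야 함
--             arr = rotation_arr(n, arr)
--         for col in range(n//2):
--             for row in range(n - (2 * (col + 1))):
--                 # 합을 계속 더해라
--                 carrots_yield[i] += arr[col][col+1+row]
--
--     return max(carrots_yield) - min(carrots_yield)
-- ===== SOURCE B (Python) =====
-- def get_carrots(n, arr):
--     s_top = s_left = s_bottom = s_right = 0
--     for i in range(n):
--         for j in range(n):
--             if i == j or i + j == n - 1:
--                 continue  # diagonal cells belong to no triangle
--             v = arr[i][j]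
--             if i < j:
--                 if i + j < n - 1:
--                     s_top += v
--                 else:
--                     s_right += v
--             else:
--                 if i + j > n - 1:
--                     s_bottom += v
--                 else:
--                     s_left += v
--     sums = (s_top, s_left, s_bottom, s_right)
--     return max(sums) - min(sums)
-- ===== Notes on version B (the rewrite author's own statement) =====
-- stated objective: simpler
-- what changed: B does a single double loop over the original grid and classifies each off-diagonal cell into one of four triangle accumulators by index inequalities, instead of materializing three successively rotated copies of the matrix and re-scanning the top triangle of each.
import Mathlib
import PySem

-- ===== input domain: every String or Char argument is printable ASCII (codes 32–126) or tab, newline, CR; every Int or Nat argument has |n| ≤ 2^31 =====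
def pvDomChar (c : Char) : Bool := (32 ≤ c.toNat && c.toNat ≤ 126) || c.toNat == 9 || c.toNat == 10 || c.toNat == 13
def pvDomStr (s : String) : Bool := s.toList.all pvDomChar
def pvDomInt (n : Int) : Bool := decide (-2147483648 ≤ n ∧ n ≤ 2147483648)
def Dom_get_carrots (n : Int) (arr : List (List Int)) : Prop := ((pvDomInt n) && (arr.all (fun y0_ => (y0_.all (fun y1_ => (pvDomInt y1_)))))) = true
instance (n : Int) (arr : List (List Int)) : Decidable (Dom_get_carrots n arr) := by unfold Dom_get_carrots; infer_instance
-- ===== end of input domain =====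

-- B replaces A's build-three-rotated-copies-and-rescan strategy by one double loop over the
-- original grid that classifies each off-diagonal cell into one of four triangle accumulators.

-- ===== PORT A =====
def rotation_arr (n : Int) (arr : List (List Int)) : List (List Int) :=
  let arr90 := (PySem.List.pyRange 0 n 1).map (fun _ => PySem.List.pyRepeat [(0:Int)] n)
  (PySem.List.pyRange 0 n 1).foldl (fun a90 col =>
    (PySem.List.pyRange 0 n 1).foldl (fun a90 row =>
      PySem.List.pySetD a90 row
        (PySem.List.pySetD (PySem.List.pyGetD a90 row []) (n - col - 1)
          (PySem.List.pyGetD (PySem.List.pyGetD arr col []) row 0))) a90) arr90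

def get_carrots (n : Int) (arr : List (List Int)) : Int :=
  let ys : List Int := PySem.List.pyRepeat [(0:Int)] 4
  let st := (PySem.List.pyRange 0 4 1).foldl
    (fun (s : List (List Int) × List Int) i =>
      let a := if i ≠ 0 then rotation_arr n s.1 else s.1
      let ys := (PySem.List.pyRange 0 (PySem.Int.floordiv n 2) 1).foldl (fun ys col =>
        (PySem.List.pyRange 0 (n - 2 * (col + 1)) 1).foldl (fun ys row =>
          PySem.List.pySetD ys i (PySem.List.pyGetD ys i 0 +
            PySem.List.pyGetD (PySem.List.pyGetD a col []) (col + 1 + row) 0)) ys) s.2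
      (a, ys)) (arr, ys)
  (PySem.List.max? st.2 (fun x => x)).getD 0 - (PySem.List.min? st.2 (fun x => x)).getD 0

-- ===== PORT B =====
def get_carrots_alt (n : Int) (arr : List (List Int)) : Int :=
  let s := (PySem.List.pyRange 0 n 1).foldl (fun (s : Int × Int × Int × Int) i =>
    (PySem.List.pyRange 0 n 1).foldl (fun (s : Int × Int × Int × Int) j =>
      if i = j ∨ i + j = n - 1 then s
      else
        let v := PySem.List.pyGetD (PySem.List.pyGetD arr i []) j 0
        if i < j then
          if i + j < n - 1 then (s.1 + v, s.2.1, s.2.2.1, s.2.2.2)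
          else (s.1, s.2.1, s.2.2.1, s.2.2.2 + v)
        else
          if i + j > n - 1 then (s.1, s.2.1, s.2.2.1 + v, s.2.2.2)
          else (s.1, s.2.1 + v, s.2.2.1, s.2.2.2)) s)
    ((0:Int), (0:Int), (0:Int), (0:Int))
  max (max (max s.1 s.2.1) s.2.2.1) s.2.2.2 - min (min (min s.1 s.2.1) s.2.2.1) s.2.2.2

-- ===== PRECONDITION & SPEC =====
-- Pre_: Python A raises IndexError (in rotation_arr / the triangle scan) unless, for n ≥ 1, the
-- grid has at least n rows whose first n each have at least n entries; all n ≤ 0 are fine (A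
-- returns 0 without indexing). Exactly those inputs are admitted.
def Pre_get_carrots (n : Int) (arr : List (List Int)) : Prop :=
  n ≤ (arr.length : Int) ∧ ∀ r ∈ arr.take n.toNat, n ≤ (r.length : Int)
instance (n : Int) (arr : List (List Int)) : Decidable (Pre_get_carrots n arr) := by
  unfold Pre_get_carrots; infer_instance
def pvWitness_get_carrots : Int × List (List Int) := (2, [[1, 2], [3, 4]])

def Spec_get_carrots (n : Int) (arr : List (List Int)) (out : Int) : Prop := out = get_carrots_alt n arr
instance (n : Int) (arr : List (List Int)) (out : Int) : Decidable (Spec_get_carrots n arr out) := by unfold Spec_get_carrots; infer_instance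

-- ===== CLAIM (what is proved, stated in full; the proofs are below) =====
def Claim_equal_get_carrots : Prop := ∀ (n : Int) (arr : List (List Int)), Dom_get_carrots n arr → Pre_get_carrots n arr → Spec_get_carrots n arr (get_carrots n arr)

-- ===== LEMMAS AND PROOFS =====

lemma pvFoldSetAdd {α : Type} (l : List α) (f : α → Int) (i : Int) (ys : List Int)
    (h0 : 0 ≤ i) (h1 : i.toNat < ys.length) :
    l.foldl (fun ys x => PySem.List.pySetD ys i (PySem.List.pyGetD ys i 0 + f x)) ys
      = PySem.List.pySetD ys i (PySem.List.pyGetD ys i 0 + (l.map f).sum) := by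
  induction l generalizing ys with
  | nil =>
    simp only [List.foldl_nil, List.map_nil, List.sum_nil, add_zero]
    rw [PySem.List.pySetD_of_nonneg ys _ h0,
        PySem.List.pyGetD_eq_getElem ys 0 h0 (by omega),
        List.set_getElem_self]
  | cons x t ih =>
    simp only [List.foldl_cons, List.map_cons, List.sum_cons]
    rw [ih _ (by simpa [PySem.List.length_pySetD] using h1)]
    rw [PySem.List.pyGetD_eq_getElem ys 0 h0 (by omega)]
    simp only [PySem.List.pySetD_of_nonneg _ _ h0]
    rw [PySem.List.pyGetD_eq_getElem (ys.set i.toNat (ys[i.toNat] + f x)) 0 h0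
          (by simp only [List.length_set]; omega)]
    rw [List.getElem_set_self (by simpa using h1), List.set_set, add_assoc]

lemma pvFold4 {α : Type} (l : List α) (f1 f2 f3 f4 : α → Int) (s : Int × Int × Int × Int) :
    l.foldl (fun s x => (s.1 + f1 x, s.2.1 + f2 x, s.2.2.1 + f3 x, s.2.2.2 + f4 x)) s
      = (s.1 + (l.map f1).sum, s.2.1 + (l.map f2).sum,
         s.2.2.1 + (l.map f3).sum, s.2.2.2 + (l.map f4).sum) := by
  induction l generalizing s with
  | nil => simp
  | cons x t ih =>
    simp only [List.foldl_cons, List.map_cons, List.sum_cons, ih]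
    refine Prod.ext ?_ (Prod.ext ?_ (Prod.ext ?_ ?_)) <;> simp <;> ring

lemma pvDoubleReflect (N : Nat) (F : Nat → Nat → Int) :
    ∑ i ∈ Finset.range N, ∑ j ∈ Finset.range N, F (N - 1 - j) i
      = ∑ i ∈ Finset.range N, ∑ j ∈ Finset.range N, F i j := by
  have h1 : ∀ i, ∑ j ∈ Finset.range N, F (N - 1 - j) i = ∑ j ∈ Finset.range N, F j i :=
    fun i => Finset.sum_range_reflect (fun j => F j i) N
  rw [Finset.sum_congr rfl (fun i _ => h1 i)]
  exact Finset.sum_comm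

lemma pvFoldSetAdd2 {α β : Type} (l : List α) (g : α → List β) (f : α → β → Int)
    (i : Int) (ys : List Int) (h0 : 0 ≤ i) (h1 : i.toNat < ys.length) :
    l.foldl (fun ys x => (g x).foldl
        (fun ys y => PySem.List.pySetD ys i (PySem.List.pyGetD ys i 0 + f x y)) ys) ys
      = PySem.List.pySetD ys i (PySem.List.pyGetD ys i 0 +
          (l.map (fun x => ((g x).map (f x)).sum)).sum) := by
  induction l generalizing ys with
  | nil =>
    simp only [List.foldl_nil, List.map_nil, List.sum_nil, add_zero]
    rw [PySem.List.pySetD_of_nonneg ys _ h0,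
        PySem.List.pyGetD_eq_getElem ys 0 h0 (by omega),
        List.set_getElem_self]
  | cons x t ih =>
    simp only [List.foldl_cons, List.map_cons, List.sum_cons]
    rw [pvFoldSetAdd (g x) (f x) i ys h0 h1]
    rw [ih _ (by simpa [PySem.List.length_pySetD] using h1)]
    rw [PySem.List.pyGetD_eq_getElem ys 0 h0 (by omega)]
    simp only [PySem.List.pySetD_of_nonneg _ _ h0]
    rw [PySem.List.pyGetD_eq_getElem (ys.set i.toNat _) 0 h0
          (by simp only [List.length_set]; omega)]
    rw [List.getElem_set_self (by simpa using h1), List.set_set, add_assoc]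

def pvCell (a : List (List Int)) (i j : Nat) : Int := (a.getD i []).getD j 0

def pvQuad (N : Nat) (a : List (List Int)) (P : Nat → Nat → Bool) : Int :=
  ∑ i ∈ Finset.range N, ∑ j ∈ Finset.range N, if P i j then pvCell a i j else 0

def pvT (N i j : Nat) : Bool := decide (i < j ∧ i + j + 1 < N)
def pvL (N i j : Nat) : Bool := decide (j < i ∧ i + j + 1 < N)
def pvB (N i j : Nat) : Bool := decide (j < i ∧ N < i + j + 1)
def pvR (N i j : Nat) : Bool := decide (i < j ∧ N < i + j + 1)

def pvS (n : Int) (a : List (List Int)) : Int :=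
  ((PySem.List.pyRange 0 (PySem.Int.floordiv n 2) 1).map (fun col =>
    ((PySem.List.pyRange 0 (n - 2 * (col + 1)) 1).map (fun row =>
      PySem.List.pyGetD (PySem.List.pyGetD a col []) (col + 1 + row) 0)).sum)).sum

lemma pvListSumRange (M : Nat) (f : Nat → Int) :
    ((List.range M).map f).sum = ∑ c ∈ Finset.range M, f c := rfl

lemma pvRowSum (N i : Nat) (a : List (List Int)) (hi : i < N) :
    ∑ r ∈ Finset.range (N - 2 * (i + 1)), pvCell a i (i + 1 + r)
      = ∑ j ∈ Finset.range N, if pvT N i j then pvCell a i j else 0 := by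
  rw [← Finset.sum_filter]
  have hfl : Finset.filter (fun j => pvT N i j = true) (Finset.range N)
      = Finset.Ico (i + 1) (N - 1 - i) := by
    ext j
    simp only [Finset.mem_filter, Finset.mem_range, Finset.mem_Ico, pvT, decide_eq_true_eq]
    omega
  rw [hfl, Finset.sum_Ico_eq_sum_range,
      show (N - 1 - i) - (i + 1) = N - 2 * (i + 1) from by omega]

lemma pvS_eq_quad (N : Nat) (a : List (List Int)) : pvS (N : Int) a = pvQuad N a (pvT N) := by
  have hfd : PySem.Int.floordiv (N : Int) 2 = ((N / 2 : Nat) : Int) := by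
    exact_mod_cast PySem.Int.floordiv_natCast N 2
  calc pvS (N : Int) a
      = ∑ c ∈ Finset.range (N / 2), ∑ r ∈ Finset.range (N - 2 * (c + 1)),
          pvCell a c (c + 1 + r) := by
        unfold pvS
        rw [hfd, PySem.List.pyRange_one, List.map_map,
            show ((((N / 2 : Nat) : Int)) - 0).toNat = N / 2 from by omega,
            pvListSumRange]
        refine Finset.sum_congr rfl (fun c _ => ?_)
        simp only [Function.comp_apply, zero_add]
        rw [PySem.List.pyRange_one, List.map_map,
            show ((N : Int) - 2 * ((c : Int) + 1) - 0).toNat = N - 2 * (c + 1) from by omega,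
            pvListSumRange]
        refine Finset.sum_congr rfl (fun r _ => ?_)
        simp only [Function.comp_apply, zero_add]
        rw [show ((c : Int) + 1 + (r : Int)) = ((c + 1 + r : Nat) : Int) from by push_cast; ring,
            PySem.List.pyGetD_natCast, PySem.List.pyGetD_natCast]
        rfl
    _ = pvQuad N a (pvT N) := by
        unfold pvQuad
        rw [← Finset.sum_subset (by intro x hx; simp only [Finset.mem_range] at hx ⊢; omega : Finset.range (N / 2) ⊆ Finset.range N)
          (by
            intro i _ hi2
            simp only [Finset.mem_range] at hi2
            refine Finset.sum_eq_zero (fun j hj => ?_)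
            rw [if_neg]
            simp only [pvT, decide_eq_true_eq, not_and]
            omega)]
        exact Finset.sum_congr rfl (fun i hi => pvRowSum N i a (by
          have := Finset.mem_range.1 hi; omega))

def pvInit (N : Nat) : List (List Int) := List.replicate N (List.replicate N 0)

def pvShape (N : Nat) (g : List (List Int)) : Prop :=
  g.length = N ∧ ∀ i, i < N → (g.getD i []).length = N

lemma pvGetD_set_eq (g : List (List Int)) (r : Nat) (x : List Int) (h : r < g.length) :
    (g.set r x).getD r [] = x := by
  simp [List.getD, h]

lemma pvGetD_set_ne (g : List (List Int)) (r i : Nat) (x : List Int) (h : i ≠ r) :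
    (g.set r x).getD i [] = g.getD i [] := by
  simp [List.getD, List.getElem?_set_ne (Ne.symm h)]

lemma pvRot_eq_nat (N : Nat) (a : List (List Int)) :
    rotation_arr (N : Int) a
      = (List.range N).foldl (fun g c =>
          (List.range N).foldl (fun g r =>
            g.set r ((g.getD r []).set (N - 1 - c) (pvCell a c r))) g) (pvInit N) := by
  unfold rotation_arr
  have hR : PySem.List.pyRange 0 (N : Int) 1 = (List.range N).map (fun k : Nat => (k : Int)) := by
    rw [PySem.List.pyRange_one]; simp
  rw [hR, List.foldl_map, List.map_map]
  have hInit : (List.range N).map ((fun _ => PySem.List.pyRepeat [(0:Int)] (N:Int)) ∘ (fun k : Nat => (k:Int)))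
      = pvInit N := by
    simp [PySem.List.pyRepeat_singleton, pvInit, Function.comp_def, List.map_const']
  rw [hInit]
  refine PySem.List.foldl_congr_mem _ _ _ _ (fun g c hc => ?_)
  replace hc : c < N := List.mem_range.1 hc
  rw [List.foldl_map]
  refine PySem.List.foldl_congr_mem _ _ _ _ (fun g' r hr => ?_)
  replace hr : r < N := List.mem_range.1 hr
  rw [show ((N:Int) - (c:Int) - 1) = ((N - 1 - c : Nat) : Int) from by omega,
      PySem.List.pySetD_natCast, PySem.List.pyGetD_natCast, PySem.List.pySetD_natCast,
      PySem.List.pyGetD_natCast, PySem.List.pyGetD_natCast]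
  rfl

lemma pvGetD_set_self_int (l : List Int) (k : Nat) (v : Int) (h : k < l.length) :
    (l.set k v).getD k 0 = v := by
  simp [List.getD, h]

lemma pvGetD_set_ne_int (l : List Int) (k j : Nat) (v : Int) (h : j ≠ k) :
    (l.set k v).getD j 0 = l.getD j 0 := by
  simp [List.getD, List.getElem?_set_ne (Ne.symm h)]

lemma pvCell_set_row (g : List (List Int)) (r : Nat) (x : List Int) (h : r < g.length) (j : Nat) :
    pvCell (g.set r x) r j = x.getD j 0 := by
  unfold pvCell; rw [pvGetD_set_eq _ _ _ h]

lemma pvCell_set_row_ne (g : List (List Int)) (r i : Nat) (x : List Int) (h : i ≠ r) (j : Nat) :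
    pvCell (g.set r x) i j = pvCell g i j := by
  unfold pvCell; rw [pvGetD_set_ne _ _ _ _ h]

lemma pvRotInner (N c : Nat) (a : List (List Int)) (m : Nat) (hm : m ≤ N) :
    ∀ (g : List (List Int)), pvShape N g →
      pvShape N ((List.range m).foldl (fun g r =>
          g.set r ((g.getD r []).set (N - 1 - c) (pvCell a c r))) g)
      ∧ ∀ i j, i < N → j < N →
        pvCell ((List.range m).foldl (fun g r =>
            g.set r ((g.getD r []).set (N - 1 - c) (pvCell a c r))) g) i j
          = if j = N - 1 - c ∧ i < m then pvCell a c i else pvCell g i j := by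
  induction m with
  | zero => intro g hg; simpa using hg
  | succ m ih =>
    intro g hg
    obtain ⟨⟨hlen, hrow⟩, hcell⟩ := ih (by omega) g hg
    rw [List.range_succ, List.foldl_append, List.foldl_cons, List.foldl_nil]
    set g' := (List.range m).foldl (fun g r =>
        g.set r ((g.getD r []).set (N - 1 - c) (pvCell a c r))) g with hg'
    have hmN : m < g'.length := by omega
    have hmrow : (g'.getD m []).length = N := hrow m (by omega)
    constructor
    · refine ⟨by rw [List.length_set]; exact hlen, fun i hi => ?_⟩
      by_cases him : i = m
      · subst him
        rw [pvGetD_set_eq _ _ _ hmN, List.length_set]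
        exact hrow i hi
      · rw [pvGetD_set_ne _ _ _ _ him]; exact hrow i hi
    · intro i j hi hj
      by_cases him : i = m
      · subst him
        rw [pvCell_set_row _ _ _ hmN]
        by_cases hjc : j = N - 1 - c
        · subst hjc
          rw [pvGetD_set_self_int _ _ _ (by rw [hmrow]; omega)]
          rw [if_pos ⟨rfl, Nat.lt_succ_self i⟩]
        · rw [pvGetD_set_ne_int _ _ _ _ hjc]
          have hc2 := hcell i j hi hj
          unfold pvCell at hc2 ⊢
          rw [hc2, if_neg (fun h => hjc h.1), if_neg (fun h => hjc h.1)]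
      · rw [pvCell_set_row_ne _ _ _ _ him]
        rw [hcell i j hi hj]
        by_cases hjc : j = N - 1 - c ∧ i < m
        · rw [if_pos hjc, if_pos ⟨hjc.1, by omega⟩]
        · rw [if_neg hjc, if_neg (fun hh => hjc ⟨hh.1, by omega⟩)]

lemma pvRotOuter (N : Nat) (a : List (List Int)) (m : Nat) (hm : m ≤ N) :
    pvShape N ((List.range m).foldl (fun g c =>
        (List.range N).foldl (fun g r =>
          g.set r ((g.getD r []).set (N - 1 - c) (pvCell a c r))) g) (pvInit N))
    ∧ ∀ i j, i < N → j < N →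
      pvCell ((List.range m).foldl (fun g c =>
          (List.range N).foldl (fun g r =>
            g.set r ((g.getD r []).set (N - 1 - c) (pvCell a c r))) g) (pvInit N)) i j
        = if N - 1 - j < m then pvCell a (N - 1 - j) i else 0 := by
  induction m with
  | zero =>
    refine ⟨⟨by simp [pvInit], fun i hi => ?_⟩, fun i j hi hj => ?_⟩
    · simp [pvInit, hi]
    · simp only [List.range_zero, List.foldl_nil, if_neg (by omega : ¬ N - 1 - j < 0)]
      unfold pvCell
      simp [pvInit, hi, hj]
  | succ m ih =>
    obtain ⟨hsh, hcell⟩ := ih (by omega)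
    rw [List.range_succ, List.foldl_append, List.foldl_cons, List.foldl_nil]
    obtain ⟨hsh', hcell'⟩ := pvRotInner N m a N le_rfl _ hsh
    refine ⟨hsh', fun i j hi hj => ?_⟩
    rw [hcell' i j hi hj]
    by_cases hjc : j = N - 1 - m
    · rw [if_pos ⟨hjc, hi⟩, if_pos (by omega), show N - 1 - j = m from by omega]
    · rw [if_neg (fun h => hjc h.1), hcell i j hi hj]
      by_cases h2 : N - 1 - j < m
      · rw [if_pos h2, if_pos (by omega)]
      · rw [if_neg h2, if_neg (by omega)]

lemma pvRot_cell (N : Nat) (a : List (List Int)) (i j : Nat) (hi : i < N) (hj : j < N) :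
    pvCell (rotation_arr (N : Int) a) i j = pvCell a (N - 1 - j) i := by
  rw [pvRot_eq_nat]
  rw [(pvRotOuter N a N le_rfl).2 i j hi hj, if_pos (by omega)]

lemma pvQuad_rot (N : Nat) (a : List (List Int)) (P Q : Nat → Nat → Bool)
    (h : ∀ i j, i < N → j < N → P (N - 1 - j) i = Q i j) :
    pvQuad N (rotation_arr (N : Int) a) Q = pvQuad N a P := by
  unfold pvQuad
  have step1 : ∀ i ∈ Finset.range N, ∀ j ∈ Finset.range N,
      (if Q i j then pvCell (rotation_arr (N : Int) a) i j else 0)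
        = (fun u v => if P u v then pvCell a u v else 0) (N - 1 - j) i := by
    intro i hi j hj
    simp only [Finset.mem_range] at hi hj
    rw [pvRot_cell N a i j hi hj]
    simp only []
    rw [h i j hi hj]
  calc ∑ i ∈ Finset.range N, ∑ j ∈ Finset.range N,
        (if Q i j then pvCell (rotation_arr (N : Int) a) i j else 0)
      = ∑ i ∈ Finset.range N, ∑ j ∈ Finset.range N,
        (fun u v => if P u v then pvCell a u v else 0) (N - 1 - j) i :=
        Finset.sum_congr rfl (fun i hi => Finset.sum_congr rfl (fun j hj => step1 i hi j hj))
    _ = ∑ i ∈ Finset.range N, ∑ j ∈ Finset.range N,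
        (if P i j then pvCell a i j else 0) :=
        pvDoubleReflect N (fun u v => if P u v then pvCell a u v else 0)

lemma pvStepEq (n i : Int) (a : List (List Int)) (ys : List Int)
    (h0 : 0 ≤ i) (h1 : i.toNat < ys.length) :
    (PySem.List.pyRange 0 (PySem.Int.floordiv n 2) 1).foldl (fun ys col =>
      (PySem.List.pyRange 0 (n - 2 * (col + 1)) 1).foldl (fun ys row =>
        PySem.List.pySetD ys i (PySem.List.pyGetD ys i 0 +
          PySem.List.pyGetD (PySem.List.pyGetD a col []) (col + 1 + row) 0)) ys) ys
    = PySem.List.pySetD ys i (PySem.List.pyGetD ys i 0 + pvS n a) :=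
  pvFoldSetAdd2 _ _ _ i ys h0 h1

lemma get_carrots_eq (n : Int) (arr : List (List Int)) :
    get_carrots n arr =
      (max (max (max (pvS n arr) (pvS n (rotation_arr n arr)))
        (pvS n (rotation_arr n (rotation_arr n arr))))
        (pvS n (rotation_arr n (rotation_arr n (rotation_arr n arr))))) -
      (min (min (min (pvS n arr) (pvS n (rotation_arr n arr)))
        (pvS n (rotation_arr n (rotation_arr n arr))))
        (pvS n (rotation_arr n (rotation_arr n (rotation_arr n arr))))) := by
  unfold get_carrots
  rw [show PySem.List.pyRange 0 4 1 = [0,1,2,3] from by decide,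
      show PySem.List.pyRepeat [(0:Int)] 4 = [0,0,0,0] from by decide]
  simp only [List.foldl_cons, List.foldl_nil]
  rw [if_neg (by norm_num : ¬ ((0:Int) ≠ 0)), if_pos (by norm_num : ((1:Int) ≠ 0)),
      if_pos (by norm_num : ((2:Int) ≠ 0)), if_pos (by norm_num : ((3:Int) ≠ 0))]
  rw [pvStepEq n 0 arr [0,0,0,0] (by norm_num) (by norm_num)]
  rw [show ∀ v : Int, PySem.List.pySetD [0,0,0,0] (0:Int)
        (PySem.List.pyGetD [0,0,0,0] (0:Int) 0 + v) = [0 + v, 0, 0, 0] from fun v => rfl]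
  rw [pvStepEq n 1 (rotation_arr n arr) [0 + pvS n arr, 0, 0, 0] (by norm_num) (by norm_num)]
  rw [show ∀ y0 v : Int, PySem.List.pySetD [y0,0,0,0] (1:Int)
        (PySem.List.pyGetD [y0,0,0,0] (1:Int) 0 + v) = [y0, 0 + v, 0, 0] from fun y0 v => rfl]
  rw [pvStepEq n 2 (rotation_arr n (rotation_arr n arr)) _ (by norm_num) (by norm_num)]
  rw [show ∀ y0 y1 v : Int, PySem.List.pySetD [y0,y1,0,0] (2:Int)
        (PySem.List.pyGetD [y0,y1,0,0] (2:Int) 0 + v) = [y0, y1, 0 + v, 0] from fun y0 y1 v => rfl]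
  rw [pvStepEq n 3 (rotation_arr n (rotation_arr n (rotation_arr n arr))) _ (by norm_num) (by norm_num)]
  rw [show ∀ y0 y1 y2 v : Int, PySem.List.pySetD [y0,y1,y2,0] (3:Int)
        (PySem.List.pyGetD [y0,y1,y2,0] (3:Int) 0 + v) = [y0, y1, y2, 0 + v] from fun y0 y1 y2 v => rfl]
  rw [PySem.List.max?_id_cons, PySem.List.min?_id_cons]
  simp only [List.foldl_cons, List.foldl_nil, Option.getD_some, zero_add]

def pvV (arr : List (List Int)) (i j : Int) : Int :=
  PySem.List.pyGetD (PySem.List.pyGetD arr i []) j 0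
def pvTI (n : Int) (arr : List (List Int)) (i j : Int) : Int :=
  if i < j ∧ i + j < n - 1 then pvV arr i j else 0
def pvLI (n : Int) (arr : List (List Int)) (i j : Int) : Int :=
  if j < i ∧ i + j < n - 1 then pvV arr i j else 0
def pvBI (n : Int) (arr : List (List Int)) (i j : Int) : Int :=
  if j < i ∧ i + j > n - 1 then pvV arr i j else 0
def pvRI (n : Int) (arr : List (List Int)) (i j : Int) : Int :=
  if i < j ∧ i + j > n - 1 then pvV arr i j else 0

lemma pvAltStep (n : Int) (arr : List (List Int)) (i j : Int) (s : Int × Int × Int × Int) :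
    (if i = j ∨ i + j = n - 1 then s
      else
        let v := PySem.List.pyGetD (PySem.List.pyGetD arr i []) j 0
        if i < j then
          if i + j < n - 1 then (s.1 + v, s.2.1, s.2.2.1, s.2.2.2)
          else (s.1, s.2.1, s.2.2.1, s.2.2.2 + v)
        else
          if i + j > n - 1 then (s.1, s.2.1, s.2.2.1 + v, s.2.2.2)
          else (s.1, s.2.1 + v, s.2.2.1, s.2.2.2))
    = (s.1 + pvTI n arr i j, s.2.1 + pvLI n arr i j,
       s.2.2.1 + pvBI n arr i j, s.2.2.2 + pvRI n arr i j) := by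
  simp only [pvTI, pvLI, pvBI, pvRI, pvV]
  split_ifs <;> simp_all <;> omega

lemma pvAltFold (n : Int) (arr : List (List Int)) :
    get_carrots_alt n arr =
      (max (max (max (((PySem.List.pyRange 0 n 1).map (fun i =>
          ((PySem.List.pyRange 0 n 1).map (fun j => pvTI n arr i j)).sum)).sum)
        (((PySem.List.pyRange 0 n 1).map (fun i =>
          ((PySem.List.pyRange 0 n 1).map (fun j => pvLI n arr i j)).sum)).sum))
        (((PySem.List.pyRange 0 n 1).map (fun i =>
          ((PySem.List.pyRange 0 n 1).map (fun j => pvBI n arr i j)).sum)).sum))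
        (((PySem.List.pyRange 0 n 1).map (fun i =>
          ((PySem.List.pyRange 0 n 1).map (fun j => pvRI n arr i j)).sum)).sum)) -
      (min (min (min (((PySem.List.pyRange 0 n 1).map (fun i =>
          ((PySem.List.pyRange 0 n 1).map (fun j => pvTI n arr i j)).sum)).sum)
        (((PySem.List.pyRange 0 n 1).map (fun i =>
          ((PySem.List.pyRange 0 n 1).map (fun j => pvLI n arr i j)).sum)).sum))
        (((PySem.List.pyRange 0 n 1).map (fun i =>
          ((PySem.List.pyRange 0 n 1).map (fun j => pvBI n arr i j)).sum)).sum))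
        (((PySem.List.pyRange 0 n 1).map (fun i =>
          ((PySem.List.pyRange 0 n 1).map (fun j => pvRI n arr i j)).sum)).sum)) := by
  unfold get_carrots_alt
  have hinner : ∀ (s : Int × Int × Int × Int) (i : Int),
      (PySem.List.pyRange 0 n 1).foldl (fun (s : Int × Int × Int × Int) j =>
        if i = j ∨ i + j = n - 1 then s
        else
          let v := PySem.List.pyGetD (PySem.List.pyGetD arr i []) j 0
          if i < j then
            if i + j < n - 1 then (s.1 + v, s.2.1, s.2.2.1, s.2.2.2)
            else (s.1, s.2.1, s.2.2.1, s.2.2.2 + v)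
          else
            if i + j > n - 1 then (s.1, s.2.1, s.2.2.1 + v, s.2.2.2)
            else (s.1, s.2.1 + v, s.2.2.1, s.2.2.2)) s
      = (s.1 + ((PySem.List.pyRange 0 n 1).map (fun j => pvTI n arr i j)).sum,
         s.2.1 + ((PySem.List.pyRange 0 n 1).map (fun j => pvLI n arr i j)).sum,
         s.2.2.1 + ((PySem.List.pyRange 0 n 1).map (fun j => pvBI n arr i j)).sum,
         s.2.2.2 + ((PySem.List.pyRange 0 n 1).map (fun j => pvRI n arr i j)).sum) := by
    intro s i
    rw [PySem.List.foldl_congr_mem _ _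
        (fun (s : Int × Int × Int × Int) j =>
          (s.1 + pvTI n arr i j, s.2.1 + pvLI n arr i j,
           s.2.2.1 + pvBI n arr i j, s.2.2.2 + pvRI n arr i j)) s
        (fun s j _ => pvAltStep n arr i j s)]
    exact pvFold4 _ _ _ _ _ _
  rw [PySem.List.foldl_congr_mem _ _
      (fun (s : Int × Int × Int × Int) i =>
        (s.1 + ((PySem.List.pyRange 0 n 1).map (fun j => pvTI n arr i j)).sum,
         s.2.1 + ((PySem.List.pyRange 0 n 1).map (fun j => pvLI n arr i j)).sum,
         s.2.2.1 + ((PySem.List.pyRange 0 n 1).map (fun j => pvBI n arr i j)).sum,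
         s.2.2.2 + ((PySem.List.pyRange 0 n 1).map (fun j => pvRI n arr i j)).sum)) _
      (fun s i _ => hinner s i), pvFold4]
  simp only [zero_add]

lemma pvSumIJ (N : Nat) (arr : List (List Int)) (FI : Int → Int → Int) (P : Nat → Nat → Bool)
    (h : ∀ i j : Nat, i < N → j < N → FI (i : Int) (j : Int)
          = if P i j then pvCell arr i j else 0) :
    ((PySem.List.pyRange 0 (N : Int) 1).map (fun i =>
      ((PySem.List.pyRange 0 (N : Int) 1).map (fun j => FI i j)).sum)).sum
    = pvQuad N arr P := by
  have hR : PySem.List.pyRange 0 (N : Int) 1 = (List.range N).map (fun k : Nat => (k : Int)) := by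
    rw [PySem.List.pyRange_one]; simp
  rw [hR, List.map_map, pvListSumRange]
  unfold pvQuad
  refine Finset.sum_congr rfl (fun i hi => ?_)
  simp only [Function.comp_apply, List.map_map, pvListSumRange]
  refine Finset.sum_congr rfl (fun j hj => ?_)
  exact h i j (Finset.mem_range.1 hi) (Finset.mem_range.1 hj)

lemma pvTI_cast (N : Nat) (arr : List (List Int)) (i j : Nat) (_hi : i < N) (_hj : j < N) :
    pvTI (N : Int) arr (i : Int) (j : Int) = if pvT N i j then pvCell arr i j else 0 := by
  unfold pvTI pvV pvT
  rw [PySem.List.pyGetD_natCast, PySem.List.pyGetD_natCast]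
  refine if_congr ?_ rfl rfl
  simp only [decide_eq_true_eq]
  omega

lemma pvLI_cast (N : Nat) (arr : List (List Int)) (i j : Nat) (_hi : i < N) (_hj : j < N) :
    pvLI (N : Int) arr (i : Int) (j : Int) = if pvL N i j then pvCell arr i j else 0 := by
  unfold pvLI pvV pvL
  rw [PySem.List.pyGetD_natCast, PySem.List.pyGetD_natCast]
  refine if_congr ?_ rfl rfl
  simp only [decide_eq_true_eq]
  omega

lemma pvBI_cast (N : Nat) (arr : List (List Int)) (i j : Nat) (_hi : i < N) (_hj : j < N) :
    pvBI (N : Int) arr (i : Int) (j : Int) = if pvB N i j then pvCell arr i j else 0 := by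
  unfold pvBI pvV pvB
  rw [PySem.List.pyGetD_natCast, PySem.List.pyGetD_natCast]
  refine if_congr ?_ rfl rfl
  simp only [decide_eq_true_eq]
  omega

lemma pvRI_cast (N : Nat) (arr : List (List Int)) (i j : Nat) (_hi : i < N) (_hj : j < N) :
    pvRI (N : Int) arr (i : Int) (j : Int) = if pvR N i j then pvCell arr i j else 0 := by
  unfold pvRI pvV pvR
  rw [PySem.List.pyGetD_natCast, PySem.List.pyGetD_natCast]
  refine if_congr ?_ rfl rfl
  simp only [decide_eq_true_eq]
  omega

lemma get_carrots_alt_eq_quad (N : Nat) (arr : List (List Int)) :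
    get_carrots_alt (N : Int) arr =
      (max (max (max (pvQuad N arr (pvT N)) (pvQuad N arr (pvL N))) (pvQuad N arr (pvB N)))
        (pvQuad N arr (pvR N))) -
      (min (min (min (pvQuad N arr (pvT N)) (pvQuad N arr (pvL N))) (pvQuad N arr (pvB N)))
        (pvQuad N arr (pvR N))) := by
  rw [pvAltFold,
      pvSumIJ N arr (pvTI (N:Int) arr) (pvT N) (pvTI_cast N arr),
      pvSumIJ N arr (pvLI (N:Int) arr) (pvL N) (pvLI_cast N arr),
      pvSumIJ N arr (pvBI (N:Int) arr) (pvB N) (pvBI_cast N arr),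
      pvSumIJ N arr (pvRI (N:Int) arr) (pvR N) (pvRI_cast N arr)]

lemma pvCorr_TL (N i j : Nat) (_hi : i < N) (_hj : j < N) : pvL N (N - 1 - j) i = pvT N i j := by
  simp only [pvL, pvT, decide_eq_decide]; omega
lemma pvCorr_LB (N i j : Nat) (_hi : i < N) (_hj : j < N) : pvB N (N - 1 - j) i = pvL N i j := by
  simp only [pvB, pvL, decide_eq_decide]; omega
lemma pvCorr_BR (N i j : Nat) (_hi : i < N) (_hj : j < N) : pvR N (N - 1 - j) i = pvB N i j := by
  simp only [pvR, pvB, decide_eq_decide]; omega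

lemma pvS_zero (n : Int) (hn : n < 0) (a : List (List Int)) : pvS n a = 0 := by
  unfold pvS
  rw [PySem.List.pyRange_one_eq_nil (by
    rw [PySem.Int.floordiv_eq_ediv_of_pos (by norm_num : (0:Int) < 2)]; omega)]
  simp

theorem pv_main (n : Int) (arr : List (List Int)) : get_carrots n arr = get_carrots_alt n arr := by
  rcases lt_or_ge n 0 with hn | hn
  · rw [get_carrots_eq]
    rw [pvS_zero n hn, pvS_zero n hn, pvS_zero n hn, pvS_zero n hn]
    unfold get_carrots_alt
    rw [PySem.List.pyRange_one_eq_nil (le_of_lt hn)]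
    simp
  · obtain ⟨N, rfl⟩ : ∃ N : Nat, n = (N : Int) := ⟨n.toNat, by omega⟩
    rw [get_carrots_eq, get_carrots_alt_eq_quad]
    rw [pvS_eq_quad N arr,
        pvS_eq_quad N (rotation_arr (N:Int) arr),
        pvS_eq_quad N (rotation_arr (N:Int) (rotation_arr (N:Int) arr)),
        pvS_eq_quad N (rotation_arr (N:Int) (rotation_arr (N:Int) (rotation_arr (N:Int) arr)))]
    rw [pvQuad_rot N arr (pvL N) (pvT N) (pvCorr_TL N),
        pvQuad_rot N (rotation_arr (N:Int) arr) (pvL N) (pvT N) (pvCorr_TL N),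
        pvQuad_rot N arr (pvB N) (pvL N) (pvCorr_LB N),
        pvQuad_rot N (rotation_arr (N:Int) (rotation_arr (N:Int) arr)) (pvL N) (pvT N) (pvCorr_TL N),
        pvQuad_rot N (rotation_arr (N:Int) arr) (pvB N) (pvL N) (pvCorr_LB N),
        pvQuad_rot N arr (pvR N) (pvB N) (pvCorr_BR N)]

-- ===== VERDICT (by name: the statement is the Claim_ definition above) =====
theorem get_carrots_spec : Claim_equal_get_carrots := by
  intro n arr _ _
  unfold Spec_get_carrots
  exact pv_main n arr
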